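-- pv_equiv track=rewrite | github.com/pypi-data/pypi-mirror-402 | packages/swiftagents/swiftagents-0.1.0.tar.gz/swiftagents-0.1.0/swiftagents/core/scheduler.py | _find_prefix_token_index
-- ===== SOURCE A (Python) =====
-- from typing import Any, Awaitable, Callable, Dict, List, Optional, Tuple
--
-- def _find_prefix_token_index(prefix: str, tokens: List[str]) -> Optional[int]:
--     if not tokens:
--         return None
--     joined = "".join(tokens)
--     prefix_idx = joined.find(prefix)
--     if prefix_idx < 0:
--         prefix_idx = 0
--     label_start = prefix_idx + len(prefix)
--     offset = 0
--     for i, token in enumerate(tokens):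
--         next_offset = offset + len(token)
--         if offset <= label_start < next_offset:
--             return i
--         offset = next_offset
--     return None
-- ===== SOURCE B (Python) =====
-- def _find_prefix_token_index(prefix, tokens):
--     if not tokens:
--         return None
--     joined = "".join(tokens)
--     prefix_idx = joined.find(prefix)
--     if prefix_idx < 0:
--         prefix_idx = 0
--     label_start = prefix_idx + len(prefix)
--     ends = []
--     total = 0
--     for t in tokens:
--         total += len(t)
--         ends.append(total)
--     if label_start >= total:
--         return None
--     lo, hi = 0, len(tokens) - 1
--     while lo < hi:
--         mid = (lo + hi) // 2
--         if ends[mid] <= label_start: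
--             lo = mid + 1
--         else:
--             hi = mid
--     return lo
-- ===== Notes on version B (the rewrite author's own statement) =====
-- stated objective: alternative
-- what changed: The linear enumerate-and-scan over (offset, token) pairs is replaced by building a cumulative-ends table once and locating the token covering label_start with a hand-written binary search (plus an explicit total-length guard for the None case).
import Mathlib
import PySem

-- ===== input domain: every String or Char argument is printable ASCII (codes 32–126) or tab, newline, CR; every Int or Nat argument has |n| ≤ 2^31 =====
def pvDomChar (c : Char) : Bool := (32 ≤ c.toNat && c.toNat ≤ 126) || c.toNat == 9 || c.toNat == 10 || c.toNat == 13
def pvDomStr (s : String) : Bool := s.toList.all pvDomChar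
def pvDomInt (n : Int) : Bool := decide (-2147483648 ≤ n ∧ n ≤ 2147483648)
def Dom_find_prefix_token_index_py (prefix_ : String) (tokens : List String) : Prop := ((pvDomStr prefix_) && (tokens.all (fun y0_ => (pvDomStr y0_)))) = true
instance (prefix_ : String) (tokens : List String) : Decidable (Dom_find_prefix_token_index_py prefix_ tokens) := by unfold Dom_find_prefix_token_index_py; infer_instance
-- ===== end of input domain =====

-- B replaces A's linear offset scan with a cumulative-ends table and a binary search (alternative decomposition, same overall cost).

-- ===== PORT A =====
-- the for-loop over enumerate(tokens) carrying (offset, i)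
def pvA_loop (label_start : Int) : List String → Int → Int → Option Int
  | [], _, _ => none
  | t :: rest, offset, i =>
    let next_offset := offset + PySem.Str.len t
    if offset ≤ label_start ∧ label_start < next_offset then some i
    else pvA_loop label_start rest next_offset (i + 1)

def find_prefix_token_index_py (prefix_ : String) (tokens : List String) : Option Int :=
  if tokens = [] then none
  else
    let joined := PySem.Str.join "" tokens
    let prefix_idx0 := PySem.Str.find joined prefix_
    let prefix_idx := if prefix_idx0 < 0 then 0 else prefix_idx0
    let label_start := prefix_idx + PySem.Str.len prefix_
    pvA_loop label_start tokens 0 0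

-- ===== PORT B =====
-- the while-loop binary search over the ends table
def pvB_bsearch (ends : List Int) (ls : Int) (lo hi : Nat) : Nat :=
  if h : lo < hi then
    let mid := (lo + hi) / 2
    if ends.getD mid 0 ≤ ls then pvB_bsearch ends ls (mid + 1) hi
    else pvB_bsearch ends ls lo mid
  else lo
termination_by hi - lo
decreasing_by all_goals omega

def find_prefix_token_index_py_alt (prefix_ : String) (tokens : List String) : Option Int :=
  if tokens = [] then none
  else
    let joined := PySem.Str.join "" tokens
    let prefix_idx0 := PySem.Str.find joined prefix_
    let prefix_idx := if prefix_idx0 < 0 then 0 else prefix_idx0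
    let label_start := prefix_idx + PySem.Str.len prefix_
    -- for t in tokens: total += len(t); ends.append(total)
    let acc := tokens.foldl (fun (acc : List Int × Int) t =>
        let tot := acc.2 + PySem.Str.len t
        (acc.1 ++ [tot], tot)) ([], 0)
    if label_start ≥ acc.2 then none
    else some ((pvB_bsearch acc.1 label_start 0 (tokens.length - 1) : Nat) : Int)

-- ===== PRECONDITION & SPEC =====
def Spec_find_prefix_token_index_py (prefix_ : String) (tokens : List String) (out : Option Int) : Prop := out = find_prefix_token_index_py_alt prefix_ tokens
instance (prefix_ : String) (tokens : List String) (out : Option Int) : Decidable (Spec_find_prefix_token_index_py prefix_ tokens out) := by unfold Spec_find_prefix_token_index_py; infer_instance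

-- ===== CLAIM (what is proved, stated in full; the proofs are below) =====
def Claim_equal_find_prefix_token_index_py : Prop := ∀ (prefix_ : String) (tokens : List String), Dom_find_prefix_token_index_py prefix_ tokens → Spec_find_prefix_token_index_py prefix_ tokens (find_prefix_token_index_py prefix_ tokens)

-- ===== LEMMAS AND PROOFS =====

-- cumulative ends of the token lengths starting from `offset`
def pvScan (offset : Int) : List String → List Int
  | [] => []
  | t :: ts => (offset + PySem.Str.len t) :: pvScan (offset + PySem.Str.len t) ts

-- running total after all tokens
def pvTot (offset : Int) : List String → Int
  | [] => offset
  | t :: ts => pvTot (offset + PySem.Str.len t) ts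

-- first index whose end exceeds ls
def pvFirst (ls : Int) : List Int → Option Nat
  | [] => none
  | e :: es => if ls < e then some 0 else (pvFirst ls es).map (· + 1)

lemma pvLen_nonneg (t : String) : 0 ≤ PySem.Str.len t := by
  simp [PySem.Str.len_eq]

lemma pvScan_length (offset : Int) (ts : List String) : (pvScan offset ts).length = ts.length := by
  induction ts generalizing offset with
  | nil => rfl
  | cons t ts ih => simp [pvScan, ih]

lemma pvScan_lb (offset : Int) (ts : List String) : ∀ x ∈ pvScan offset ts, offset ≤ x := by
  induction ts generalizing offset with
  | nil => simp [pvScan]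
  | cons t ts ih =>
    intro x hx
    have h0 := pvLen_nonneg t
    simp only [pvScan, List.mem_cons] at hx
    rcases hx with h | h
    · omega
    · have := ih (offset + PySem.Str.len t) x h; omega

lemma pvScan_mono (ts : List String) (offset : Int) :
    ∀ i j, i ≤ j → j < (pvScan offset ts).length →
      (pvScan offset ts).getD i 0 ≤ (pvScan offset ts).getD j 0 := by
  induction ts generalizing offset with
  | nil => simp [pvScan]
  | cons t ts ih =>
    intro i j hij hj
    match i, j with
    | 0, 0 => exact le_refl _
    | 0, j + 1 =>
      simp only [pvScan, List.getD_cons_zero, List.getD_cons_succ]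
      simp only [pvScan, List.length_cons] at hj
      have hmem : (pvScan (offset + PySem.Str.len t) ts).getD j 0 ∈ pvScan (offset + PySem.Str.len t) ts := by
        rw [List.getD_eq_getElem _ _ (by omega)]
        exact List.getElem_mem _
      exact pvScan_lb _ _ _ hmem
    | i + 1, j + 1 =>
      simp only [pvScan, List.getD_cons_succ]
      simp only [pvScan, List.length_cons] at hj
      exact ih _ i j (by omega) (by omega)

lemma pvTot_last (ts : List String) (offset : Int) (h : ts ≠ []) :
    pvTot offset ts = (pvScan offset ts).getD (ts.length - 1) 0 := by
  induction ts generalizing offset with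
  | nil => simp at h
  | cons t ts ih =>
    cases ts with
    | nil => simp [pvTot, pvScan]
    | cons u us =>
      rw [show pvTot offset (t :: u :: us) = pvTot (offset + PySem.Str.len t) (u :: us) from rfl]
      rw [ih _ (by simp)]
      simp [pvScan]

lemma pvFirst_some (ls : Int) (es : List Int) (j : Nat) (h : pvFirst ls es = some j) :
    j < es.length ∧ ls < es.getD j 0 ∧ ∀ k, k < j → es.getD k 0 ≤ ls := by
  induction es generalizing j with
  | nil => simp [pvFirst] at h
  | cons e es ih =>
    simp only [pvFirst] at h
    by_cases hc : ls < e
    · rw [if_pos hc] at h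
      cases h
      exact ⟨by simp, by simpa using hc, by omega⟩
    · rw [if_neg hc] at h
      cases hF : pvFirst ls es with
      | none => rw [hF] at h; simp at h
      | some j' =>
        rw [hF] at h; simp at h
        obtain ⟨h1, h2, h3⟩ := ih j' hF
        subst h
        refine ⟨by simpa using h1, by simpa using h2, ?_⟩
        intro k hk
        match k with
        | 0 => simpa using le_of_not_gt hc
        | k + 1 => simpa using h3 k (by omega)

lemma pvFirst_none (ls : Int) (es : List Int) (h : pvFirst ls es = none) :
    ∀ k, k < es.length → es.getD k 0 ≤ ls := by
  induction es with
  | nil => simp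
  | cons e es ih =>
    simp only [pvFirst] at h
    by_cases hc : ls < e
    · rw [if_pos hc] at h; simp at h
    · rw [if_neg hc] at h
      simp only [Option.map_eq_none_iff] at h
      intro k hk
      match k with
      | 0 => simpa using le_of_not_gt hc
      | k + 1 =>
        simp only [List.length_cons] at hk
        simpa using ih h k (by omega)

-- A's loop computes the first covering index, shifted by i
lemma pvA_loop_eq (ls : Int) (ts : List String) :
    ∀ offset i, offset ≤ ls →
      pvA_loop ls ts offset i = (pvFirst ls (pvScan offset ts)).map (fun j => i + (j : Int)) := by
  induction ts with
  | nil => intro offset i _; simp [pvA_loop, pvScan, pvFirst]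
  | cons t ts ih =>
    intro offset i hle
    simp only [pvA_loop, pvScan, pvFirst]
    by_cases hc : ls < offset + PySem.Str.len t
    · rw [if_pos ⟨hle, hc⟩, if_pos hc]
      simp
    · rw [if_neg (by tauto), if_neg hc]
      rw [ih (offset + PySem.Str.len t) (i + 1) (le_of_not_gt hc)]
      cases pvFirst ls (pvScan (offset + PySem.Str.len t) ts) with
      | none => simp
      | some j => simp; ring

-- the binary search finds the first index whose end exceeds ls
lemma pvB_bsearch_correct (es : List Int) (ls : Int)
    (mono : ∀ i j, i ≤ j → j < es.length → es.getD i 0 ≤ es.getD j 0)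
    (j : Nat) (h1 : ls < es.getD j 0) (h2 : ∀ k, k < j → es.getD k 0 ≤ ls) :
    ∀ n lo hi, hi - lo ≤ n → lo ≤ j → j ≤ hi → hi < es.length → pvB_bsearch es ls lo hi = j := by
  intro n
  induction n with
  | zero =>
    intro lo hi hn hlo hhi hlen
    have heq : lo = hi := by omega
    unfold pvB_bsearch
    rw [dif_neg (by omega)]
    omega
  | succ n ih =>
    intro lo hi hn hlo hhi hlen
    unfold pvB_bsearch
    by_cases hlt : lo < hi
    · rw [dif_pos hlt]
      have hmid1 : lo ≤ (lo + hi) / 2 := by omega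
      have hmid2 : (lo + hi) / 2 < hi := by omega
      by_cases hm : es.getD ((lo + hi) / 2) 0 ≤ ls
      · rw [if_pos hm]
        have hjgt : (lo + hi) / 2 < j := by
          by_contra hcon
          have := mono j ((lo + hi) / 2) (by omega) (by omega)
          omega
        exact ih ((lo + hi) / 2 + 1) hi (by omega) (by omega) hhi hlen
      · rw [if_neg hm]
        have hjle : j ≤ (lo + hi) / 2 := by
          by_contra hcon
          exact hm (h2 _ (by omega))
        exact ih lo ((lo + hi) / 2) (by omega) hlo hjle (by omega)
    · rw [dif_neg hlt]
      omega

-- B's foldl builds exactly the scan and the running total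
lemma pvFold_eq (ts : List String) :
    ∀ (acc : List Int) (tot : Int),
      ts.foldl (fun (acc : List Int × Int) t =>
          let t' := acc.2 + PySem.Str.len t
          (acc.1 ++ [t'], t')) (acc, tot)
        = (acc ++ pvScan tot ts, pvTot tot ts) := by
  induction ts with
  | nil => intro acc tot; simp [pvScan, pvTot]
  | cons t ts ih =>
    intro acc tot
    simp only [List.foldl_cons]
    rw [ih]
    simp [pvScan, pvTot]

-- ===== VERDICT (by name: the statement is the Claim_ definition above) =====
theorem find_prefix_token_index_py_spec : Claim_equal_find_prefix_token_index_py := by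
  unfold Claim_equal_find_prefix_token_index_py
  intro prefix_ tokens _
  unfold Spec_find_prefix_token_index_py find_prefix_token_index_py find_prefix_token_index_py_alt
  by_cases hnil : tokens = []
  · rw [if_pos hnil, if_pos hnil]
  · rw [if_neg hnil, if_neg hnil]
    set pidx0 := PySem.Str.find (PySem.Str.join "" tokens) prefix_ with hp0
    set ls := (if pidx0 < 0 then 0 else pidx0) + PySem.Str.len prefix_ with hls
    have hls0 : 0 ≤ ls := by
      have := pvLen_nonneg prefix_
      rw [hls]
      split_ifs with h <;> omega
    rw [pvFold_eq tokens [] 0]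
    simp only [List.nil_append]
    rw [pvA_loop_eq ls tokens 0 0 hls0]
    set es := pvScan 0 tokens with hes
    have hlen := pvScan_length 0 tokens
    rw [← hes] at hlen
    have hmono := pvScan_mono tokens 0
    rw [← hes] at hmono
    have htot := pvTot_last tokens 0 hnil
    rw [← hes] at htot
    have hne : 0 < tokens.length := List.length_pos_iff.mpr hnil
    cases hF : pvFirst ls es with
    | none =>
      have hall := pvFirst_none ls es hF
      rw [if_pos ?_]
      · simp
      · rw [htot]
        have := hall (tokens.length - 1) (by omega)
        omega
    | some j =>
      obtain ⟨hj1, hj2, hj3⟩ := pvFirst_some ls es j hF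
      rw [if_neg ?_]
      · have hbs : pvB_bsearch es ls 0 (tokens.length - 1) = j :=
          pvB_bsearch_correct es ls hmono j hj2 hj3
            (tokens.length - 1) 0 (tokens.length - 1) (by omega) (by omega) (by omega) (by omega)
        rw [hbs]
        simp
      · rw [htot]
        have := hmono j (tokens.length - 1) (by omega) (by omega)
        omega
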